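-- pv_equiv track=rewrite | github.com/miliar/Code_Jam_Webscraper | Solutions_in_python/Problem_155/prA.py | comp
-- ===== SOURCE A (Python) =====
-- def comp(max, conf):
--   sum = int(conf[0])
--   no_friend = 0
--   for index in range(1, max+1):
--     no_person = sum + no_friend
--     if no_person < index:
--       no_friend += index-no_person
--     sum+= int(conf[index])
--   return no_friend
-- ===== SOURCE B (Python) =====
-- def comp(max, conf):
--     # pass 1: cumulative sums of the given counts conf[0..max]; prefix[k] == conf[0]+...+conf[k]
--     prefix = [int(conf[0])]
--     for k in range(1, max + 1):
--         prefix.append(prefix[-1] + int(conf[k]))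
--     # pass 2: the answer is the largest deficit k - prefix[k-1], floored at 0
--     best = 0
--     for k in range(1, max + 1):
--         deficit = k - prefix[k - 1]
--         if deficit > best:
--             best = deficit
--     return best
-- ===== Notes on version B (the rewrite author's own statement) =====
-- stated objective: alternative
-- what changed: B is a two-pass prefix-sum formulation: it first materialises the list of prefix sums of conf[0..max-1], then takes a running maximum of the deficits k - prefix[k-1]; A instead runs one stateful loop that feeds the friend count back into the comparison sum and tops it up incrementally (and also parses the unused element conf[max]).
import Mathlib
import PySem

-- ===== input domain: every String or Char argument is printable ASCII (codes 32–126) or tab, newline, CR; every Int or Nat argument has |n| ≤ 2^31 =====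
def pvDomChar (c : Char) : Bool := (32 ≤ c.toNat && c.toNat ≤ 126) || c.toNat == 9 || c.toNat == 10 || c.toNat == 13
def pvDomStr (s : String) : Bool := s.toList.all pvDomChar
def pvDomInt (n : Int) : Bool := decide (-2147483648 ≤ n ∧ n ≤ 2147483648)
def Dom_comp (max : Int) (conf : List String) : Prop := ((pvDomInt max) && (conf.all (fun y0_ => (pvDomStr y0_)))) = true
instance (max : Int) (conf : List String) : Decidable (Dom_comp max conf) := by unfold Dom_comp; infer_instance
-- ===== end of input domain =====

-- B replaces A's single stateful top-up loop by a two-pass prefix-sum/running-max decomposition (alternative, same cost; return value only).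

-- ===== PORT A =====
-- literal port of A; the Option state is `none` exactly where the Python raises (IndexError/ValueError)
def comp (max : Int) (conf : List String) : Int :=
  match (PySem.List.pyGet? conf 0).bind PySem.Int.ofStr? with
  | none => 0
  | some s0 =>
    match (PySem.List.pyRange 1 (max + 1) 1).foldl
        (fun (st : Option (Int × Int)) idx =>
          match st with
          | none => none
          | some (sum, no_friend) =>
            let no_person := sum + no_friend
            let no_friend' := if no_person < idx then no_friend + (idx - no_person) else no_friend
            match (PySem.List.pyGet? conf idx).bind PySem.Int.ofStr? with
            | none => none
            | some v => some (sum + v, no_friend'))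
        (some (s0, 0)) with
    | none => 0
    | some (_, no_friend) => no_friend

-- ===== PORT B =====
-- literal port of Source B: pass 1 builds the cumulative-sum list of conf[0..max], pass 2 keeps a running max of deficits
def comp_alt (max : Int) (conf : List String) : Int :=
  match (PySem.List.pyGet? conf 0).bind PySem.Int.ofStr? with
  | none => 0
  | some v0 =>
    match (PySem.List.pyRange 1 (max + 1) 1).foldl
        (fun (st : Option (List Int)) k =>
          match st with
          | none => none
          | some prefix_ =>
            match PySem.List.pyGet? prefix_ (-1) with
            | none => none
            | some last =>
              match (PySem.List.pyGet? conf k).bind PySem.Int.ofStr? with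
              | none => none
              | some v => some (prefix_ ++ [last + v]))
        (some [v0]) with
    | none => 0
    | some prefix_ =>
      match (PySem.List.pyRange 1 (max + 1) 1).foldl
          (fun (st : Option Int) k =>
            match st with
            | none => none
            | some best =>
              match PySem.List.pyGet? prefix_ (k - 1) with
              | none => none
              | some p => some (if k - p > best then k - p else best))
          (some 0) with
      | none => 0
      | some best => best

-- ===== PRECONDITION & SPEC =====
-- Pre_comp = exactly the inputs on which the Python A returns: conf[0..max] all exist and parse as ints
def Pre_comp (max : Int) (conf : List String) : Prop :=
  max.toNat + 1 ≤ conf.length ∧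
  ∀ s ∈ conf.take (max.toNat + 1), (PySem.Int.ofStr? s).isSome = true
instance (max : Int) (conf : List String) : Decidable (Pre_comp max conf) := by
  unfold Pre_comp; infer_instance

def pvWitness_comp : Int × List String := (1, ["3", "0"])

def Spec_comp (max : Int) (conf : List String) (out : Int) : Prop := out = comp_alt max conf
instance (max : Int) (conf : List String) (out : Int) : Decidable (Spec_comp max conf out) := by
  unfold Spec_comp; infer_instance

-- ===== CLAIM (what is proved, stated in full; the proofs are below) =====
def Claim_equal_comp : Prop := ∀ (max : Int) (conf : List String),
  Dom_comp max conf → Pre_comp max conf → Spec_comp max conf (comp max conf)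

-- ===== LEMMAS AND PROOFS =====

-- parsed value of conf[i] (as an Option), and its defaulted form
def pvVal (conf : List String) (i : Nat) : Option Int :=
  (PySem.List.pyGet? conf (i : Int)).bind PySem.Int.ofStr?
def pvV (conf : List String) (i : Nat) : Int := (pvVal conf i).getD 0
-- prefix sums: pvP conf k = conf[0] + … + conf[k-1]
def pvP (conf : List String) : Nat → Int
  | 0 => 0
  | k + 1 => pvP conf k + pvV conf k
-- running max of deficits: pvN conf k = max over 1 ≤ j ≤ k of (j - pvP conf j), floored at 0
def pvN (conf : List String) : Nat → Int
  | 0 => 0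
  | k + 1 =>
      if ((k : Int) + 1) - pvP conf (k + 1) > pvN conf k then ((k : Int) + 1) - pvP conf (k + 1)
      else pvN conf k

theorem pvLA (conf : List String) (n : Nat)
    (hv : ∀ i, i ≤ n → (pvVal conf i).isSome = true) :
    (PySem.List.pyRange 1 ((n : Int) + 1) 1).foldl
      (fun (st : Option (Int × Int)) idx =>
        match st with
        | none => none
        | some (sum, no_friend) =>
          let no_person := sum + no_friend
          let no_friend' := if no_person < idx then no_friend + (idx - no_person) else no_friend
          match (PySem.List.pyGet? conf idx).bind PySem.Int.ofStr? with
          | none => none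
          | some v => some (sum + v, no_friend'))
      (some (pvP conf 1, 0)) = some (pvP conf (n + 1), pvN conf n) := by
  induction n with
  | zero => simp [PySem.List.pyRange_one_eq_nil, pvN]
  | succ m ih =>
    have h1 : (1 : Int) ≤ (m : Int) + 1 := by omega
    have hcast : ((m + 1 : Nat) : Int) = (m : Int) + 1 := by push_cast; ring
    rw [hcast, PySem.List.pyRange_one_succ_right h1, List.foldl_append,
      ih (fun i hi => hv i (by omega))]
    have hsome := hv (m + 1) (le_refl _)
    obtain ⟨v, hvv⟩ := Option.isSome_iff_exists.mp hsome
    have hvv' : (PySem.List.pyGet? conf ((m : Int) + 1)).bind PySem.Int.ofStr? = some v := by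
      rw [← hcast]; exact hvv
    simp only [List.foldl_cons, List.foldl_nil, hvv']
    have hP : pvP conf (m + 1) + v = pvP conf (m + 1 + 1) := by
      simp [pvP, pvV, hvv]
    have hN : (if pvP conf (m + 1) + pvN conf m < (m : Int) + 1 then
        pvN conf m + (((m : Int) + 1) - (pvP conf (m + 1) + pvN conf m)) else pvN conf m)
        = pvN conf (m + 1) := by
      simp only [pvN]; split_ifs <;> omega
    simp only [← hP, ← hN]

theorem pvLB1 (conf : List String) (n : Nat)
    (hv : ∀ i, i ≤ n → (pvVal conf i).isSome = true) :
    (PySem.List.pyRange 1 ((n : Int) + 1) 1).foldl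
      (fun (st : Option (List Int)) k =>
        match st with
        | none => none
        | some prefix_ =>
          match PySem.List.pyGet? prefix_ (-1) with
          | none => none
          | some last =>
            match (PySem.List.pyGet? conf k).bind PySem.Int.ofStr? with
            | none => none
            | some v => some (prefix_ ++ [last + v]))
      (some [pvP conf 1]) = some ((List.range (n + 1)).map (fun i => pvP conf (i + 1))) := by
  induction n with
  | zero => simp [PySem.List.pyRange_one_eq_nil]
  | succ m ih =>
    have h1 : (1 : Int) ≤ (m : Int) + 1 := by omega
    have hcast : ((m + 1 : Nat) : Int) = (m : Int) + 1 := by push_cast; ring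
    rw [hcast, PySem.List.pyRange_one_succ_right h1, List.foldl_append,
      ih (fun i hi => hv i (by omega))]
    have hsome := hv (m + 1) (le_refl _)
    obtain ⟨v, hvv⟩ := Option.isSome_iff_exists.mp hsome
    have hvv' : (PySem.List.pyGet? conf ((m : Int) + 1)).bind PySem.Int.ofStr? = some v := by
      rw [← hcast]; exact hvv
    have hsplit : (List.range (m + 1)).map (fun i => pvP conf (i + 1))
        = (List.range m).map (fun i => pvP conf (i + 1)) ++ [pvP conf (m + 1)] := by
      rw [List.range_succ, List.map_append]; rfl
    simp only [List.foldl_cons, List.foldl_nil, hsplit,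
      PySem.List.pyGet?_neg_one_append_singleton, hvv']
    have hP : pvP conf (m + 1) + v = pvP conf (m + 1 + 1) := by
      simp [pvP, pvV, hvv]
    rw [hP, List.range_succ (n := m + 1), List.map_append, ← hsplit]
    rfl

theorem pvLB2 (conf : List String) (m n : Nat) (hn : n ≤ m) :
    (PySem.List.pyRange 1 ((n : Int) + 1) 1).foldl
      (fun (st : Option Int) k =>
        match st with
        | none => none
        | some best =>
          match PySem.List.pyGet? ((List.range m).map (fun i => pvP conf (i + 1))) (k - 1) with
          | none => none
          | some p => some (if k - p > best then k - p else best))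
      (some 0) = some (pvN conf n) := by
  induction n with
  | zero => simp [PySem.List.pyRange_one_eq_nil, pvN]
  | succ j ih =>
    have h1 : (1 : Int) ≤ (j : Int) + 1 := by omega
    have hcast : ((j + 1 : Nat) : Int) = (j : Int) + 1 := by push_cast; ring
    rw [hcast, PySem.List.pyRange_one_succ_right h1, List.foldl_append, ih (by omega)]
    have hidx : ((j : Int) + 1) - 1 = ((j : Nat) : Int) := by omega
    have hget : PySem.List.pyGet? ((List.range m).map (fun i => pvP conf (i + 1))) (((j : Nat) : Int))
        = some (pvP conf (j + 1)) := by
      rw [PySem.List.pyGet?_natCast]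
      rw [List.getElem?_map]
      rw [List.getElem?_range (by omega)]
      rfl
    simp only [List.foldl_cons, List.foldl_nil, hidx, hget]
    simp only [pvN]

theorem pvPre_val (conf : List String) (max : Int) (hpre : Pre_comp max conf) :
    ∀ i, i ≤ max.toNat → (pvVal conf i).isSome = true := by
  intro i hi
  obtain ⟨hlen, hparse⟩ := hpre
  have hilen : i < conf.length := by omega
  have hget : PySem.List.pyGet? conf (i : Int) = some conf[i] := by
    rw [PySem.List.pyGet?_natCast, List.getElem?_eq_getElem hilen]
  have hmem : conf[i] ∈ conf.take (max.toNat + 1) := by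
    have : i < max.toNat + 1 := by omega
    have h2 : (conf.take (max.toNat + 1))[i]'(by simp; omega) = conf[i] := List.getElem_take
    exact h2 ▸ List.getElem_mem _
  have := hparse _ hmem
  simp [pvVal, hget, this]

-- ===== VERDICT (by name: the statement is the Claim_ definition above) =====
theorem comp_spec : Claim_equal_comp := by
  unfold Claim_equal_comp
  intro max conf _ hpre
  unfold Spec_comp
  have hv := pvPre_val conf max hpre
  by_cases hm : 0 ≤ max
  · have hmax : max = (max.toNat : Int) := (Int.toNat_of_nonneg hm).symm
    have h0 : pvVal conf 0 = some (pvV conf 0) := by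
      have := hv 0 (by omega)
      obtain ⟨w, hw⟩ := Option.isSome_iff_exists.mp this
      simp [pvV, hw]
    have h0' : (PySem.List.pyGet? conf 0).bind PySem.Int.ofStr? = some (pvV conf 0) := by
      have : ((0 : Nat) : Int) = (0 : Int) := rfl
      rw [← this]; exact h0
    have hP1 : pvP conf 1 = pvV conf 0 := by simp [pvP]
    unfold comp comp_alt
    rw [hmax, h0']
    dsimp only
    rw [← hP1, pvLA conf max.toNat hv,
      pvLB1 conf max.toNat (fun i hi => hv i (by omega))]
    dsimp only
    rw [pvLB2 conf (max.toNat + 1) max.toNat (by omega)]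
  · have hA : PySem.List.pyRange 1 (max + 1) 1 = [] :=
      PySem.List.pyRange_one_eq_nil (by omega)
    unfold comp comp_alt
    rw [hA]
    simp only [List.foldl_nil]
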